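-- pv_equiv track=rewrite | github.com/2005-Aneeshdutt/SOC-SYSTEM | soclsim/correlation/mitre.py | mitre_for_keys
-- ===== SOURCE A (Python) =====
-- from typing import Dict, List
--
-- MITRE_MAP: List[Dict[str, str]] = [
--     {
--         "key": "bruteforce",
--         "tactic": "Credential Access",
--         "technique": "Brute Force",
--         "technique_id": "T1110",
--     },
--     {
--         "key": "valid_accounts",
--         "tactic": "Defense Evasion",
--         "technique": "Valid Accounts",
--         "technique_id": "T1078",
--     },
--     {
--         "key": "command_and_control",
--         "tactic": "Command and Control",
--         "technique": "Application Layer Protocol",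
--         "technique_id": "T1071",
--     },
--     {
--         "key": "ingress_tool_transfer",
--         "tactic": "Command and Control",
--         "technique": "Ingress Tool Transfer",
--         "technique_id": "T1105",
--     },
--     {
--         "key": "account_manipulation",
--         "tactic": "Persistence",
--         "technique": "Account Manipulation",
--         "technique_id": "T1098",
--     },
--     {
--         "key": "remote_services",
--         "tactic": "Lateral Movement",
--         "technique": "Remote Services",
--         "technique_id": "T1021",
--     },
--     {
--         "key": "port_scan",
--         "tactic": "Discovery",
--         "technique": "Network Service Scanning",
--         "technique_id": "T1046",
--     },
-- ]
--
-- def mitre_for_keys(keys: List[str]) -> List[Dict[str, str]]: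
--     out: List[Dict[str, str]] = []
--     for k in keys:
--         for m in MITRE_MAP:
--             if m["key"] == k:
--                 out.append(
--                     {
--                         "tactic": m["tactic"],
--                         "technique": m["technique"],
--                         "technique_id": m["technique_id"],
--                     }
--                 )
--     # dedupe
--     seen = set()
--     deduped = []
--     for m in out:
--         key = (m["technique_id"], m["technique"])
--         if key in seen:
--             continue
--         seen.add(key)
--         deduped.append(m)
--     return deduped
-- ===== SOURCE B (Python) =====
-- from typing import Dict, List
--
-- MITRE_MAP: List[Dict[str, str]] = [
--     {"key": "bruteforce", "tactic": "Credential Access", "technique": "Brute Force", "technique_id": "T1110"},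
--     {"key": "valid_accounts", "tactic": "Defense Evasion", "technique": "Valid Accounts", "technique_id": "T1078"},
--     {"key": "command_and_control", "tactic": "Command and Control", "technique": "Application Layer Protocol", "technique_id": "T1071"},
--     {"key": "ingress_tool_transfer", "tactic": "Command and Control", "technique": "Ingress Tool Transfer", "technique_id": "T1105"},
--     {"key": "account_manipulation", "tactic": "Persistence", "technique": "Account Manipulation", "technique_id": "T1098"},
--     {"key": "remote_services", "tactic": "Lateral Movement", "technique": "Remote Services", "technique_id": "T1021"},
--     {"key": "port_scan", "tactic": "Discovery", "technique": "Network Service Scanning", "technique_id": "T1046"},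
-- ]
--
-- # Index built once: key -> payload (tactic/technique/technique_id)
-- _INDEX: Dict[str, Dict[str, str]] = {
--     m["key"]: {"tactic": m["tactic"], "technique": m["technique"], "technique_id": m["technique_id"]}
--     for m in MITRE_MAP
-- }
--
-- def mitre_for_keys(keys: List[str]) -> List[Dict[str, str]]:
--     seen = set()
--     result: List[Dict[str, str]] = []
--     for k in keys:
--         payload = _INDEX.get(k)
--         if payload is None:
--             continue
--         dk = (payload["technique_id"], payload["technique"])
--         if dk not in seen:
--             seen.add(dk)
--             result.append(dict(payload))
--     return result
-- ===== Notes on version B (the rewrite author's own statement) =====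
-- stated objective: simpler
-- what changed: B replaces A's two dependent passes (inner scan of MITRE_MAP per key producing an intermediate list, then a separate dedupe pass) with a prebuilt key->payload index and one fused pass that skips unknown keys and dedupes as it goes.
import Mathlib
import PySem

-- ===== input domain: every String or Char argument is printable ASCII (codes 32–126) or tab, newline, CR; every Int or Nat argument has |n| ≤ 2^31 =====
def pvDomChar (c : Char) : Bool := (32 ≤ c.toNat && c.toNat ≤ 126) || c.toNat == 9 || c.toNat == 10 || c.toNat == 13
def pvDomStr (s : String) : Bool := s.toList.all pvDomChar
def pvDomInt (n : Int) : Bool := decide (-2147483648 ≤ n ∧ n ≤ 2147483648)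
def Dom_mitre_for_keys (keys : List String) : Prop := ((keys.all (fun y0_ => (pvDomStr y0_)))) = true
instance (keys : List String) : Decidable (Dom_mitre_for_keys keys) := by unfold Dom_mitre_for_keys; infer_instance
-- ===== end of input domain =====

-- B builds a key->payload index once and fuses A's map-all-then-dedupe passes into a single
-- pass with a seen-set; same return value, simpler single-pass decomposition.


-- ===== PORT A =====
-- MITRE_MAP: module constant, a list of dicts (association lists).
def pvMITRE_MAP : List (PySem.Dict String String) := [
  PySem.Dict.mk [("key","bruteforce"),("tactic","Credential Access"),("technique","Brute Force"),("technique_id","T1110")],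
  PySem.Dict.mk [("key","valid_accounts"),("tactic","Defense Evasion"),("technique","Valid Accounts"),("technique_id","T1078")],
  PySem.Dict.mk [("key","command_and_control"),("tactic","Command and Control"),("technique","Application Layer Protocol"),("technique_id","T1071")],
  PySem.Dict.mk [("key","ingress_tool_transfer"),("tactic","Command and Control"),("technique","Ingress Tool Transfer"),("technique_id","T1105")],
  PySem.Dict.mk [("key","account_manipulation"),("tactic","Persistence"),("technique","Account Manipulation"),("technique_id","T1098")],
  PySem.Dict.mk [("key","remote_services"),("tactic","Lateral Movement"),("technique","Remote Services"),("technique_id","T1021")],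
  PySem.Dict.mk [("key","port_scan"),("tactic","Discovery"),("technique","Network Service Scanning"),("technique_id","T1046")]]

-- m["x"]: exact here since every literal entry of MITRE_MAP carries all four keys (KeyError unreachable).
def pvGet (m : PySem.Dict String String) (k : String) : String := PySem.Dict.getD m k ""

def mitre_for_keys (keys : List String) : List (List (String × String)) :=
  let out : List (List (String × String)) := keys.foldl (fun out k =>
    pvMITRE_MAP.foldl (fun out m =>
      if pvGet m "key" == k then
        out ++ [[("tactic", pvGet m "tactic"), ("technique", pvGet m "technique"),
                 ("technique_id", pvGet m "technique_id")]]
      else out) out) []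
  (out.foldl (fun (st : PySem.Set (String × String) × List (List (String × String))) m =>
      let key := (PySem.Dict.getD (PySem.Dict.mk m) "technique_id" "", PySem.Dict.getD (PySem.Dict.mk m) "technique" "")
      if PySem.Set.contains st.1 key then st
      else (PySem.Set.add st.1 key, st.2 ++ [m]))
    (PySem.Set.empty, [])).2

-- ===== PORT B =====
-- _INDEX: dict comprehension over MITRE_MAP, key -> payload.
def pvINDEX : PySem.Dict String (List (String × String)) :=
  pvMITRE_MAP.foldl (fun d m =>
    d.insert (PySem.Dict.getD m "key" "")
      [("tactic", PySem.Dict.getD m "tactic" ""), ("technique", PySem.Dict.getD m "technique" ""),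
       ("technique_id", PySem.Dict.getD m "technique_id" "")]) PySem.Dict.empty

def mitre_for_keys_alt (keys : List String) : List (List (String × String)) :=
  (keys.foldl (fun (st : PySem.Set (String × String) × List (List (String × String))) k =>
      match PySem.Dict.get? pvINDEX k with
      | none => st
      | some payload =>
        let dk := (PySem.Dict.getD (PySem.Dict.mk payload) "technique_id" "", PySem.Dict.getD (PySem.Dict.mk payload) "technique" "")
        if PySem.Set.contains st.1 dk then st
        else (PySem.Set.add st.1 dk, st.2 ++ [payload]))
    (PySem.Set.empty, [])).2

-- ===== PRECONDITION & SPEC =====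
def Spec_mitre_for_keys (keys : List String) (out : List (List (String × String))) : Prop := out = mitre_for_keys_alt keys
instance (keys : List String) (out : List (List (String × String))) : Decidable (Spec_mitre_for_keys keys out) := by unfold Spec_mitre_for_keys; infer_instance

-- ===== CLAIM (what is proved, stated in full; the proofs are below) =====
def Claim_equal_mitre_for_keys : Prop := ∀ (keys : List String), Dom_mitre_for_keys keys → Spec_mitre_for_keys keys (mitre_for_keys keys)

-- ===== LEMMAS AND PROOFS =====

-- payload built by A for one MITRE_MAP entry
def pvPayA (m : PySem.Dict String String) : List (String × String) :=
  [("tactic", pvGet m "tactic"), ("technique", pvGet m "technique"),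
   ("technique_id", pvGet m "technique_id")]

-- A's inner scan for a single key, started from the empty list
def pvMatches (k : String) : List (List (String × String)) :=
  (pvMITRE_MAP.filter (fun m => pvGet m "key" == k)).map pvPayA

-- A's dedupe step (= B's per-payload step) on the shared (seen, result) state
def pvDD (st : PySem.Set (String × String) × List (List (String × String)))
    (m : List (String × String)) : PySem.Set (String × String) × List (List (String × String)) :=
  let key := (PySem.Dict.getD (PySem.Dict.mk m) "technique_id" "", PySem.Dict.getD (PySem.Dict.mk m) "technique" "")
  if PySem.Set.contains st.1 key then st
  else (PySem.Set.add st.1 key, st.2 ++ [m])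

lemma pvInner_eq (out : List (List (String × String))) (k : String) :
    pvMITRE_MAP.foldl (fun out m =>
      if pvGet m "key" == k then
        out ++ [[("tactic", pvGet m "tactic"), ("technique", pvGet m "technique"),
                 ("technique_id", pvGet m "technique_id")]]
      else out) out = out ++ pvMatches k := by
  simpa [pvMatches, pvPayA] using
    PySem.List.foldl_append_if (l := pvMITRE_MAP) (acc := out)
      (fun m => pvGet m "key" == k) (fun m => pvPayA m)

lemma pvOut_eq (keys : List String) (out : List (List (String × String))) :
    keys.foldl (fun out k =>
      pvMITRE_MAP.foldl (fun out m =>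
        if pvGet m "key" == k then
          out ++ [[("tactic", pvGet m "tactic"), ("technique", pvGet m "technique"),
                   ("technique_id", pvGet m "technique_id")]]
        else out) out) out = out ++ keys.flatMap pvMatches := by
  induction keys generalizing out with
  | nil => simp
  | cons k ks ih => rw [List.foldl_cons, pvInner_eq, ih]; simp

-- A's matches of a single key are exactly B's index lookup (at most one match)
lemma pvMatches_eq (k : String) : pvMatches k = (PySem.Dict.get? pvINDEX k).toList := by
  by_cases h1 : k = "bruteforce"
  · subst h1; decide
  by_cases h2 : k = "valid_accounts"
  · subst h2; decide
  by_cases h3 : k = "command_and_control"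
  · subst h3; decide
  by_cases h4 : k = "ingress_tool_transfer"
  · subst h4; decide
  by_cases h5 : k = "account_manipulation"
  · subst h5; decide
  by_cases h6 : k = "remote_services"
  · subst h6; decide
  by_cases h7 : k = "port_scan"
  · subst h7; decide
  have e : pvINDEX = PySem.Dict.mk
      [("bruteforce", [("tactic", "Credential Access"), ("technique", "Brute Force"), ("technique_id", "T1110")]),
       ("valid_accounts", [("tactic", "Defense Evasion"), ("technique", "Valid Accounts"), ("technique_id", "T1078")]),
       ("command_and_control", [("tactic", "Command and Control"), ("technique", "Application Layer Protocol"), ("technique_id", "T1071")]),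
       ("ingress_tool_transfer", [("tactic", "Command and Control"), ("technique", "Ingress Tool Transfer"), ("technique_id", "T1105")]),
       ("account_manipulation", [("tactic", "Persistence"), ("technique", "Account Manipulation"), ("technique_id", "T1098")]),
       ("remote_services", [("tactic", "Lateral Movement"), ("technique", "Remote Services"), ("technique_id", "T1021")]),
       ("port_scan", [("tactic", "Discovery"), ("technique", "Network Service Scanning"), ("technique_id", "T1046")])] := by decide
  rw [e]
  simp [pvMatches, pvMITRE_MAP, pvGet, PySem.Dict.getD, beq_iff_eq,
        Ne.symm h1, Ne.symm h2, Ne.symm h3, Ne.symm h4, Ne.symm h5, Ne.symm h6, Ne.symm h7, PySem.Dict.get?]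

-- per-key: folding A's matches with the dedupe step equals B's single lookup step
lemma pvKey_step (st : PySem.Set (String × String) × List (List (String × String))) (k : String) :
    (pvMatches k).foldl pvDD st =
      (match PySem.Dict.get? pvINDEX k with
       | none => st
       | some payload =>
         let dk := (PySem.Dict.getD (PySem.Dict.mk payload) "technique_id" "", PySem.Dict.getD (PySem.Dict.mk payload) "technique" "")
         if PySem.Set.contains st.1 dk then st
         else (PySem.Set.add st.1 dk, st.2 ++ [payload])) := by
  rw [pvMatches_eq]
  cases h : PySem.Dict.get? pvINDEX k <;> simp [pvDD]

lemma pvMain (keys : List String) (st : PySem.Set (String × String) × List (List (String × String))) :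
    (keys.flatMap pvMatches).foldl pvDD st =
      keys.foldl (fun st k =>
        match PySem.Dict.get? pvINDEX k with
        | none => st
        | some payload =>
          let dk := (PySem.Dict.getD (PySem.Dict.mk payload) "technique_id" "", PySem.Dict.getD (PySem.Dict.mk payload) "technique" "")
          if PySem.Set.contains st.1 dk then st
          else (PySem.Set.add st.1 dk, st.2 ++ [payload])) st := by
  induction keys generalizing st with
  | nil => simp
  | cons k ks ih =>
    simp only [List.flatMap_cons, List.foldl_append, List.foldl_cons, ih, pvKey_step]

-- ===== VERDICT (by name: the statement is the Claim_ definition above) =====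
theorem mitre_for_keys_spec : Claim_equal_mitre_for_keys := by
  intro keys _
  unfold Spec_mitre_for_keys mitre_for_keys mitre_for_keys_alt
  rw [pvOut_eq keys []]
  simp only [List.nil_append]
  rw [show (fun (st : PySem.Set (String × String) × List (List (String × String))) m =>
      let key := (PySem.Dict.getD (PySem.Dict.mk m) "technique_id" "", PySem.Dict.getD (PySem.Dict.mk m) "technique" "")
      if PySem.Set.contains st.1 key then st
      else (PySem.Set.add st.1 key, st.2 ++ [m])) = pvDD from rfl]
  rw [pvMain]
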